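-- pv_equiv track=rewrite | github.com/winston-dve-knopki/analyzis_expertize | scripts/summarize_llm_graphics.py | get_graphs_by_page
-- ===== SOURCE A (Python) =====
-- from typing import Any, Dict, List, Optional, Tuple
--
-- def get_graphs_by_page(graphs: List[dict]) -> Dict[int, List[dict]]:
--     """Сгруппировать графики по номеру страницы (page)."""
--     by_page: Dict[int, List[dict]] = {}
--     for g in graphs:
--         p = g.get("page")
--         if p is not None:
--             by_page.setdefault(p, []).append(g)
--     for p in by_page:
--         by_page[p].sort(key=lambda x: (x.get("graph_id") or 0))
--     return by_page
-- ===== SOURCE B (Python) =====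
-- from typing import Any, Dict, List, Optional, Tuple
--
-- def get_graphs_by_page(graphs: List[dict]) -> Dict[int, List[dict]]:
--     """Сгруппировать графики по номеру страницы (page)."""
--     by_page: Dict[int, List[dict]] = {}
--     for g in graphs:
--         p = g.get("page")
--         if p is None:
--             continue
--         bucket = by_page.setdefault(p, [])
--         k = g.get("graph_id") or 0
--         i = 0
--         while i < len(bucket) and not k < (bucket[i].get("graph_id") or 0):
--             i += 1
--         bucket.insert(i, g)
--     return by_page
-- ===== Notes on version B (the rewrite author's own statement) =====
-- stated objective: alternative
-- what changed: B maintains each page bucket sorted at all times by inserting every graph at its position (online insertion, one pass, no sort call), instead of A's two-phase append-everything-then-sort-each-bucket; stability of A's sort equals B's insert-after-equal-keys rule.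
import Mathlib
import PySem

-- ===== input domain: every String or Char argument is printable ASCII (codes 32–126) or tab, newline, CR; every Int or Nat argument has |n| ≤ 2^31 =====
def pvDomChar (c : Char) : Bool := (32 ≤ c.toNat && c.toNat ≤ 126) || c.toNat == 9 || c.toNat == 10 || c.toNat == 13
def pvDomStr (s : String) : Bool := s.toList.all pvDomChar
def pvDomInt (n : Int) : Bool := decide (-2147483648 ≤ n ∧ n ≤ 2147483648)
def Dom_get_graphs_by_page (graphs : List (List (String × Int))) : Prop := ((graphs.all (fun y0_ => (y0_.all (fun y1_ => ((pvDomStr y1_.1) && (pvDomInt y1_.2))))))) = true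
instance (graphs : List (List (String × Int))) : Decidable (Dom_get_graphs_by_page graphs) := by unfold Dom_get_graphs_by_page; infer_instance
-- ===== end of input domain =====

-- B keeps every page bucket sorted at all times by inserting each graph at its position in one pass
-- (online insertion, no sort call), instead of A's append-then-sort-each-bucket (alternative decomposition).


-- ===== PORT A =====
-- g.get("page")
def pvPage (g : List (String × Int)) : Option Int := PySem.Dict.get? ⟨g⟩ "page"

-- the sort key lambda x: (x.get("graph_id") or 0)  ('v or 0' is 0 when v is falsy, else v); shared by both sources
def pvGid (g : List (String × Int)) : Int :=
  match PySem.Dict.get? ⟨g⟩ "graph_id" with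
  | none => 0
  | some v => if v = 0 then 0 else v

def get_graphs_by_page (graphs : List (List (String × Int))) : List (Int × List (List (String × Int))) :=
  -- by_page.setdefault(p, []).append(g)  =  by_page[p] = by_page.get(p, []) + [g]  (PySem.Dict.modify)
  let by_page : PySem.Dict Int (List (List (String × Int))) :=
    graphs.foldl (fun d g =>
      match pvPage g with
      | some p => PySem.Dict.modify d p [] (fun gs => gs ++ [g])
      | none => d) ⟨[]⟩
  -- for p in by_page: by_page[p].sort(key=…)  — values sorted in place, key order unchanged
  by_page.items.map (fun pv => (pv.1, PySem.List.sorted pv.2 pvGid))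

-- ===== PORT B =====
-- B's while loop: scan the bucket past every element whose key is ≤ k, insert g there
-- ('i += 1 while not k < gid(bucket[i])', then bucket.insert(i, g)); exact, step for step
def pvInsertSorted (k : Int) (g : List (String × Int)) : List (List (String × Int)) → List (List (String × Int))
  | [] => [g]
  | b :: bs => if k < pvGid b then g :: b :: bs else b :: pvInsertSorted k g bs

def get_graphs_by_page_alt (graphs : List (List (String × Int))) : List (Int × List (List (String × Int))) :=
  (graphs.foldl (fun d g =>
    match pvPage g with
    | some p => PySem.Dict.modify d p [] (fun bucket => pvInsertSorted (pvGid g) g bucket)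
    | none => d) (⟨[]⟩ : PySem.Dict Int (List (List (String × Int))))).items

-- ===== PRECONDITION & SPEC =====
def Spec_get_graphs_by_page (graphs : List (List (String × Int))) (out : List (Int × List (List (String × Int)))) : Prop := out = get_graphs_by_page_alt graphs
instance (graphs : List (List (String × Int))) (out : List (Int × List (List (String × Int)))) : Decidable (Spec_get_graphs_by_page graphs out) := by unfold Spec_get_graphs_by_page; infer_instance

-- ===== CLAIM (what is proved, stated in full; the proofs are below) =====
def Claim_equal_get_graphs_by_page : Prop := ∀ (graphs : List (List (String × Int))), Dom_get_graphs_by_page graphs → Spec_get_graphs_by_page graphs (get_graphs_by_page graphs)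

-- ===== LEMMAS AND PROOFS =====

-- first-appearance page order and the per-page group (proof helpers)
def pvPagesOf (graphs : List (List (String × Int))) : List Int :=
  graphs.foldl (fun acc g =>
    match pvPage g with
    | some p => if p ∈ acc then acc else acc ++ [p]
    | none => acc) []

def pvGroupOf (graphs : List (List (String × Int))) (p : Int) : List (List (String × Int)) :=
  graphs.filter (fun g => pvPage g == some p)

theorem pv_mem_pagesOf_aux (xs : List (List (String × Int))) (acc : List Int) (p : Int) :
    (p ∈ acc ∨ ∃ g ∈ xs, pvPage g = some p) →
      p ∈ xs.foldl (fun acc g =>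
        match pvPage g with
        | some q => if q ∈ acc then acc else acc ++ [q]
        | none => acc) acc := by
  induction xs generalizing acc with
  | nil =>
    rintro (h | ⟨g, hg, _⟩)
    · simpa using h
    · simp at hg
  | cons x xs ih =>
    intro h
    rw [List.foldl_cons]
    apply ih
    rcases h with h | ⟨g, hg, hpg⟩
    · left
      rcases hx : pvPage x with _ | q
      · simpa using h
      · simp only []
        split_ifs <;> simp [h]
    · rcases List.mem_cons.mp hg with rfl | hg'
      · left
        simp only [hpg]
        split_ifs with hm
        · exact hm
        · simp
      · exact Or.inr ⟨g, hg', hpg⟩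

theorem pv_groupOf_eq_nil_of_not_mem (xs : List (List (String × Int))) (p : Int)
    (h : p ∉ pvPagesOf xs) : pvGroupOf xs p = [] := by
  rw [pvGroupOf, List.filter_eq_nil_iff]
  intro g hg hpg
  exact h (pv_mem_pagesOf_aux xs [] p (Or.inr ⟨g, hg, by simpa using hpg⟩))

theorem pvPagesOf_append (xs : List (List (String × Int))) (g : List (String × Int)) :
    pvPagesOf (xs ++ [g]) =
      match pvPage g with
      | some p => if p ∈ pvPagesOf xs then pvPagesOf xs else pvPagesOf xs ++ [p]
      | none => pvPagesOf xs := by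
  simp [pvPagesOf, List.foldl_append]

theorem pvGroupOf_append (xs : List (List (String × Int))) (g : List (String × Int)) (p : Int) :
    pvGroupOf (xs ++ [g]) p =
      pvGroupOf xs p ++ (if pvPage g = some p then [g] else []) := by
  simp only [pvGroupOf, List.filter_append]
  split_ifs with h <;> simp [h]

theorem pv_any_map (pages : List Int) (p : Int) (f : Int → List (List (String × Int))) :
    ((pages.map (fun q => (q, f q))).any (fun e => e.1 == p)) = decide (p ∈ pages) := by
  rw [List.any_map]
  induction pages with
  | nil => rfl
  | cons a l ihp =>
    simp only [List.any_cons, ihp]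
    by_cases h : a = p
    · simp [h]
    · simp [h, Ne.symm h]

theorem pv_find_map (pages : List Int) (p : Int) (f : Int → List (List (String × Int)))
    (hp : p ∈ pages) :
    (Option.map (fun x => x.2) (List.find? (fun e => e.1 == p) (pages.map (fun q => (q, f q))))).getD []
      = f p := by
  rw [List.find?_map]
  rcases hf : List.find? ((fun (e : Int × List (List (String × Int))) => e.1 == p) ∘ (fun q => (q, f q))) pages with _ | q
  · exfalso
    have := List.find?_eq_none.mp hf p hp
    simp at this
  · have h1 := List.find?_some hf
    simp at h1
    subst h1
    simp

-- BOTH ports' dict loop, for an arbitrary bucket-update step: its items are the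
-- first-appearance pages, each with the step folded over that page's group
theorem pv_fold_eq (step : List (List (String × Int)) → List (String × Int) → List (List (String × Int)))
    (graphs : List (List (String × Int))) :
    (graphs.foldl (fun d g =>
        match pvPage g with
        | some p => PySem.Dict.modify d p [] (fun gs => step gs g)
        | none => d) (⟨[]⟩ : PySem.Dict Int (List (List (String × Int))))).items
      = (pvPagesOf graphs).map (fun p => (p, (pvGroupOf graphs p).foldl step [])) := by
  induction graphs using List.reverseRecOn with
  | nil => simp [pvPagesOf, pvGroupOf]
  | append_singleton xs g ih =>
    rw [List.foldl_append, List.foldl_cons, List.foldl_nil, pvPagesOf_append]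
    rcases hx : pvPage g with _ | p
    · simp only []
      rw [ih]
      apply List.map_congr_left
      intro q _
      rw [pvGroupOf_append, hx]
      simp
    · have hd : (xs.foldl (fun d g =>
          match pvPage g with
          | some p => PySem.Dict.modify d p [] (fun gs => step gs g)
          | none => d) (⟨[]⟩ : PySem.Dict Int (List (List (String × Int)))))
            = PySem.Dict.mk ((pvPagesOf xs).map (fun q => (q, (pvGroupOf xs q).foldl step []))) := by
        rw [← ih]
      rw [hd]
      simp only [PySem.Dict.modify, PySem.Dict.insert, PySem.Dict.contains,
        PySem.Dict.getD, PySem.Dict.get?, pv_any_map]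
      by_cases hp : p ∈ pvPagesOf xs
      · simp only [hp, decide_true, if_pos]
        rw [pv_find_map _ _ _ hp, List.map_map]
        apply List.map_congr_left
        intro q hq
        by_cases hqp : q = p
        · subst hqp
          simp [Function.comp, pvGroupOf_append, hx, List.foldl_append]
        · simp [Function.comp, hqp, pvGroupOf_append, hx, Ne.symm hqp]
      · simp only [hp, decide_false, Bool.false_eq_true, if_false]
        rw [List.map_append]
        congr 1
        · apply List.map_congr_left
          intro q hq
          have hne : q ≠ p := fun h => hp (h ▸ hq)
          rw [pvGroupOf_append, hx]
          simp [Ne.symm hne]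
        · have hnone : List.find? (fun (e : Int × List (List (String × Int))) => e.1 == p)
              ((pvPagesOf xs).map (fun q => (q, (pvGroupOf xs q).foldl step []))) = none := by
            rw [List.find?_map]
            rcases hf : List.find? ((fun (e : Int × List (List (String × Int))) => e.1 == p) ∘ (fun q => (q, (pvGroupOf xs q).foldl step []))) (pvPagesOf xs) with _ | q
            · rfl
            · exfalso
              have h2 := List.mem_of_find?_eq_some hf
              have h1 := List.find?_some hf
              simp at h1
              exact hp (h1 ▸ h2)
          rw [hnone]
          simp [pvGroupOf_append, hx, pv_groupOf_eq_nil_of_not_mem xs p hp]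

-- A's step folded over a group is the group itself
theorem pv_foldl_append_id (l : List (List (String × Int))) (acc : List (List (String × Int))) :
    l.foldl (fun gs g => gs ++ [g]) acc = acc ++ l := by
  induction l generalizing acc with
  | nil => simp
  | cons x xs ih => simp [ih]

-- B's hand-written insertion is PySem's stable insertBy on the key pvGid
theorem pvInsertSorted_eq_insertBy (g : List (String × Int)) (l : List (List (String × Int))) :
    pvInsertSorted (pvGid g) g l = PySem.List.insertBy (fun a b => decide (pvGid a < pvGid b)) g l := by
  induction l with
  | nil => rfl
  | cons b bs ih =>
    simp only [pvInsertSorted, PySem.List.insertBy, ih]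
    by_cases h : pvGid g < pvGid b <;> simp [h]

-- ===== VERDICT (by name: the statement is the Claim_ definition above) =====
theorem get_graphs_by_page_spec : Claim_equal_get_graphs_by_page := by
  intro graphs _
  simp only [Spec_get_graphs_by_page, get_graphs_by_page, get_graphs_by_page_alt]
  rw [pv_fold_eq, pv_fold_eq, List.map_map]
  apply List.map_congr_left
  intro p _
  simp only [Function.comp]
  rw [pv_foldl_append_id, List.nil_append,
    PySem.List.sorted_eq_foldl_insertBy]
  have hf : (fun acc x => PySem.List.insertBy (fun a b => decide (pvGid a < pvGid b)) x acc)
      = (fun bucket (g : List (String × Int)) => pvInsertSorted (pvGid g) g bucket) := by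
    funext acc g
    exact (pvInsertSorted_eq_insertBy g acc).symm
  rw [hf]
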